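-- pv_equiv track=rewrite | github.com/Josh-Hiz/SGBCourses | _static/cs515_challenges/Week3/Challenge2/sol.py | sum_and_length
-- ===== SOURCE A (Python) =====
-- def sum_and_length(l):
--     if len(l) == 0:
--         return [0, 0]
--     else:
--         # you could also write:
--         # [s, n] = sum_and_length(l[1:])
--         sal = sum_and_length(l[1:])
--         s = sal[0]
--         n = sal[1]
--         return [s+l[0], n+1]
-- ===== SOURCE B (Python) =====
-- def sum_and_length(l):
--     # Single iterative pass in reverse, matching the recursion's fold order.
--     s = 0
--     n = 0
--     for x in reversed(l):
--         s = x + s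
--         n += 1
--     return [s, n]
-- ===== Notes on version B (the rewrite author's own statement) =====
-- stated objective: simpler
-- what changed: Replaces the O(n^2) recursion with repeated list slicing by a single iterative pass over the reversed list accumulating sum and count.
import Mathlib
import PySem

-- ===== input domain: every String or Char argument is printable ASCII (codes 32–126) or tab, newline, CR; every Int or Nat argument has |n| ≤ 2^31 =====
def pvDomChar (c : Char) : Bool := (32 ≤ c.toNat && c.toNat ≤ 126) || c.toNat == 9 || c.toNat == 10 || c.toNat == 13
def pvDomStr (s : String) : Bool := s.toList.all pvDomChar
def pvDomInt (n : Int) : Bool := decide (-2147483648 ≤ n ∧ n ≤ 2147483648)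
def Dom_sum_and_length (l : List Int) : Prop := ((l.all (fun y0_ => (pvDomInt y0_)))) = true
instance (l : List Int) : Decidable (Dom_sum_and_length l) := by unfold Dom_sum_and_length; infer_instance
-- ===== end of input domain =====

-- ===== PORT A =====
def sum_and_length (l : List Int) : List Int :=
  match l with
  | [] => [0, 0]
  | x :: rest =>
    let sal := sum_and_length rest
    let s := sal.getD 0 0
    let n := sal.getD 1 0
    [s + x, n + 1]

-- ===== PORT B =====
def sum_and_length_alt (l : List Int) : List Int :=
  let p := l.reverse.foldl (fun (acc : Int × Int) x => (x + acc.1, acc.2 + 1)) (0, 0)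
  [p.1, p.2]

-- ===== PRECONDITION & SPEC =====
def Spec_sum_and_length (l : List Int) (out : List Int) : Prop := out = sum_and_length_alt l
instance (l : List Int) (out : List Int) : Decidable (Spec_sum_and_length l out) := by unfold Spec_sum_and_length; infer_instance

-- ===== CLAIM (what is proved, stated in full; the proofs are below) =====
def Claim_equal_sum_and_length : Prop := ∀ (l : List Int), Dom_sum_and_length l → Spec_sum_and_length l (sum_and_length l)

-- ===== LEMMAS AND PROOFS =====

-- ===== VERDICT (by name: the statement is the Claim_ definition above) =====
theorem alt_cons (x : Int) (l : List Int) :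
    sum_and_length_alt (x :: l) =
      [(sum_and_length_alt l).getD 0 0 + x, (sum_and_length_alt l).getD 1 0 + 1] := by
  simp [sum_and_length_alt, List.foldl_append, Int.add_comm]

theorem ab_eq (l : List Int) : sum_and_length l = sum_and_length_alt l := by
  induction l with
  | nil => simp [sum_and_length, sum_and_length_alt]
  | cons x rest ih => rw [sum_and_length, alt_cons, ih]

theorem sum_and_length_spec : Claim_equal_sum_and_length := by
  intro l _
  exact ab_eq l
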